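-- pv_equiv track=rewrite | github.com/Spiznasm/Python_Practice | index_generator.py | index_generator
-- ===== SOURCE A (Python) =====
-- UP = 1
--
-- DOWN = 2
--
-- LEFT = 3
--
-- RIGHT = 4
--
-- OFFSETS = {UP: (1, 0),
--            DOWN: (-1, 0),
--            LEFT: (0, 1),
--            RIGHT: (0, -1)}
--
-- def index_generator(start_tiles,direction,height,width):
--     """
--     Helper function to create the index that will be used with the move method
--     """
--     if direction == UP or DOWN:
--         end = height-1
--     elif direction == LEFT or RIGHT:
--         end = width-1
--     #empty list to append the indices into
--     index_grid = []
--     #beginning with the starting coordinate of each line, generate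
--     #the rest of the coordinates in that line.
--     for start_coordinate in start_tiles:
--         coordinate_list = []
--         coordinate_list.append(start_coordinate)
--         next_coordinate = list(start_coordinate)
--         while len(coordinate_list) <= end:
--             next_coordinate[0] += OFFSETS[direction][0]
--             next_coordinate[1] += OFFSETS[direction][1]
--             coordinate_list.append(tuple(next_coordinate))
--         index_grid.append(coordinate_list)
--     return index_grid
-- ===== SOURCE B (Python) =====
-- UP = 1
-- DOWN = 2
-- LEFT = 3
-- RIGHT = 4
-- OFFSETS = {UP: (1, 0), DOWN: (-1, 0), LEFT: (0, 1), RIGHT: (0, -1)}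
--
-- def index_generator(start_tiles, direction, height, width):
--     # Build the grid layer by layer: layer k holds the k-th coordinate of every
--     # line at once (the previous layer shifted by the offset); zip(*layers)
--     # transposes the layers back into one line per start tile.
--     prev = list(start_tiles)
--     layers = [prev]
--     for _ in range(height - 1):
--         dx, dy = OFFSETS[direction]
--         prev = [(x + dx, y + dy) for (x, y) in prev]
--         layers.append(prev)
--     return [list(line) for line in zip(*layers)]
-- ===== Notes on version B (the rewrite author's own statement) =====
-- stated objective: alternative
-- what changed: B builds the grid layer by layer -- each layer is the whole previous layer of start tiles shifted once by the offset -- and then transposes the layers with zip(*layers) into per-tile lines, instead of A's per-tile while-loop walking one running coordinate.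
-- outside the precondition, e.g. on index_generator([], 0, 5, 6): A returns [], B raises KeyError
import Mathlib
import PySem

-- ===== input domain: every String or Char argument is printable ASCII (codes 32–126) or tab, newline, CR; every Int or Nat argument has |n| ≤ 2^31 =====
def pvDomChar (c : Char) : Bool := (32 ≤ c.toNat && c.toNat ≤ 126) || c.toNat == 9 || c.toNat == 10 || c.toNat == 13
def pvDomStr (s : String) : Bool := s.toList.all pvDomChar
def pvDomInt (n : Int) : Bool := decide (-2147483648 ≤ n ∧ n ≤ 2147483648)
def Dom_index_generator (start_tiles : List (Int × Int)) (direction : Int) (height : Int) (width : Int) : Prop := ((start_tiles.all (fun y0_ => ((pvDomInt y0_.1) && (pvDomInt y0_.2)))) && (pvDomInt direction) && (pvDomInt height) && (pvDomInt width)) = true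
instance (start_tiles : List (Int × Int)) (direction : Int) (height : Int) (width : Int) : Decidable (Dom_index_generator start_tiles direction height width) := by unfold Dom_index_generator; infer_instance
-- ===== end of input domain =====

-- B builds the grid layer by layer (each layer = all start tiles shifted once)
-- and transposes with zip(*layers), instead of A's per-tile while-loop
-- (alternative decomposition, same cost).


-- ===== PORT A =====
-- OFFSETS = {1:(1,0), 2:(-1,0), 3:(0,1), 4:(0,-1)}
def OFFSETS : PySem.Dict Int (Int × Int) :=
  PySem.Dict.ofList [(1, (1, 0)), (2, (-1, 0)), (3, (0, 1)), (4, (0, -1))]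

-- the while-loop: while len(coordinate_list) <= end: next += offset; append(tuple(next)).
-- OFFSETS[direction] is looked up via get?.getD (0,0): exact on Pre_ (the KeyError case is excluded by Pre_).
def igLoop (off : Int × Int) (endv : Int) (coordList : List (Int × Int)) (next : Int × Int) : List (Int × Int) :=
  if h : (coordList.length : Int) ≤ endv then
    let nx := (next.1 + off.1, next.2 + off.2)
    igLoop off endv (coordList ++ [nx]) nx
  else coordList
termination_by (endv + 1 - coordList.length).toNat
decreasing_by simp; omega

def index_generator (start_tiles : List (Int × Int)) (direction : Int) (height : Int) (width : Int) : List (List (Int × Int)) :=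
  -- 'if direction == UP or DOWN:' is always truthy, so end = height-1 always
  let endv := height - 1
  start_tiles.foldl (fun index_grid s =>
    index_grid ++ [igLoop ((OFFSETS.get? direction).getD (0, 0)) endv [s] s]) []

-- ===== PORT B =====
-- the for-loop of Source B: n iterations, each looks up the offset, shifts prev and appends it
def igBuild (direction : Int) : Nat → List (List (Int × Int)) → List (Int × Int) → List (List (Int × Int))
  | 0, layers, _ => layers
  | n + 1, layers, prev =>
    let off := (OFFSETS.get? direction).getD (0, 0)   -- exact on Pre_ (KeyError excluded)
    let prev' := prev.map (fun p => (p.1 + off.1, p.2 + off.2))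
    igBuild direction n (layers ++ [prev']) prev'

-- zip(*layers): take the heads of every layer, or stop at the first exhausted layer
def pvHeads? (ls : List (List (Int × Int))) : Option (List (Int × Int) × List (List (Int × Int))) :=
  match ls with
  | [] => some ([], [])
  | l :: rest =>
    match l, pvHeads? rest with
    | x :: xs, some (hs, ts) => some (x :: hs, xs :: ts)
    | _, _ => none

def zipStarGo (fuel : Nat) (ls : List (List (Int × Int))) : List (List (Int × Int)) :=
  match fuel with
  | 0 => []
  | fuel + 1 =>
    match pvHeads? ls with
    | some (hs, ts) => hs :: zipStarGo fuel ts
    | none => []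

-- zip truncates at the shortest layer; fuel = first layer's length suffices
def zipStar (ls : List (List (Int × Int))) : List (List (Int × Int)) :=
  match ls with
  | [] => []
  | l0 :: _ => zipStarGo l0.length ls

def index_generator_alt (start_tiles : List (Int × Int)) (direction : Int) (height : Int) (width : Int) : List (List (Int × Int)) :=
  let prev := start_tiles
  let layers := igBuild direction (height - 1).toNat [prev] prev
  zipStar layers

-- ===== PRECONDITION & SPEC =====
-- Pre_ excludes invalid directions with height ≥ 2: there A raises KeyError whenever its inner
-- loop body runs (nonempty start_tiles) and B raises KeyError on its per-step offset lookup;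
-- on empty start_tiles with such a direction A returns [] while B raises (cite in claim.json).
def Pre_index_generator (start_tiles : List (Int × Int)) (direction : Int) (height : Int) (width : Int) : Prop :=
  direction = 1 ∨ direction = 2 ∨ direction = 3 ∨ direction = 4 ∨ height ≤ 1
instance (start_tiles : List (Int × Int)) (direction : Int) (height : Int) (width : Int) : Decidable (Pre_index_generator start_tiles direction height width) := by unfold Pre_index_generator; infer_instance

def pvWitness_index_generator : (List (Int × Int)) × Int × Int × Int := ([(0, 0), (2, 3)], 1, 3, 4)

def Spec_index_generator (start_tiles : List (Int × Int)) (direction : Int) (height : Int) (width : Int) (out : List (List (Int × Int))) : Prop := out = index_generator_alt start_tiles direction height width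
instance (start_tiles : List (Int × Int)) (direction : Int) (height : Int) (width : Int) (out : List (List (Int × Int))) : Decidable (Spec_index_generator start_tiles direction height width out) := by unfold Spec_index_generator; infer_instance

-- ===== CLAIM (what is proved, stated in full; the proofs are below) =====
def Claim_equal_index_generator : Prop := ∀ (start_tiles : List (Int × Int)) (direction : Int) (height : Int) (width : Int), Dom_index_generator start_tiles direction height width → Pre_index_generator start_tiles direction height width → Spec_index_generator start_tiles direction height width (index_generator start_tiles direction height width)

-- ===== LEMMAS AND PROOFS =====

-- A's while-loop in closed form: it appends next + (i+1)*off for i < (endv+1-len).toNat.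
theorem igLoop_eq (off : Int × Int) (endv : Int) (coordList : List (Int × Int)) (next : Int × Int) :
    igLoop off endv coordList next =
      coordList ++ (List.range (endv + 1 - coordList.length).toNat).map
        (fun (i : Nat) => (next.1 + ((i : Int) + 1) * off.1, next.2 + ((i : Int) + 1) * off.2)) := by
  rw [igLoop]
  split_ifs with h
  · rw [igLoop_eq]
    have hk : (endv + 1 - (coordList ++ [(next.1 + off.1, next.2 + off.2)]).length).toNat + 1
        = (endv + 1 - coordList.length).toNat := by simp; omega
    rw [← hk, List.range_succ_eq_map]
    simp only [List.map_cons, List.map_map, List.append_assoc, List.cons_append, List.nil_append]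
    congr 1
    congr 1
    · push_cast; ring_nf
    · apply List.map_congr_left
      intro i _
      simp only [Function.comp, Prod.mk.injEq]
      constructor <;> (push_cast; ring)
  · have : (endv + 1 - (coordList.length : Int)).toNat = 0 := by omega
    simp [this]
termination_by (endv + 1 - coordList.length).toNat
decreasing_by simp; omega

-- A's foldl of appended singletons is a map.
theorem foldl_append_singleton {α β : Type} (f : α → β) (xs : List α) (init : List β) :
    xs.foldl (fun acc s => acc ++ [f s]) init = init ++ xs.map f := by
  induction xs generalizing init with
  | nil => simp
  | cons x xs ih => simp [List.foldl_cons, ih]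

-- B's layer loop in closed form: layer i (0-based after the seed) is prev shifted (i+1) times.
theorem igBuild_eq (direction : Int) (n : Nat) (layers : List (List (Int × Int))) (prev : List (Int × Int)) :
    igBuild direction n layers prev =
      layers ++ (List.range n).map (fun (i : Nat) =>
        prev.map (fun p => (p.1 + ((i : Int) + 1) * ((OFFSETS.get? direction).getD (0, 0)).1,
                            p.2 + ((i : Int) + 1) * ((OFFSETS.get? direction).getD (0, 0)).2))) := by
  induction n generalizing layers prev with
  | zero => simp [igBuild]
  | succ n ih =>
    rw [igBuild, ih, List.range_succ_eq_map]
    simp only [List.map_cons, List.map_map, List.append_assoc, List.cons_append, List.nil_append]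
    congr 1
    congr 1
    · apply List.map_congr_left; intro p _
      simp only [Prod.mk.injEq]
      constructor <;> ring
    · apply List.map_congr_left
      intro i _
      simp only [Function.comp, List.map_map]
      apply List.map_congr_left
      intro p _
      simp only [Function.comp, Prod.mk.injEq]
      constructor <;> (push_cast; ring)

-- taking heads of layers that are all maps over the same cons
theorem pvHeads?_map (gs : List ((Int × Int) → (Int × Int))) (x : Int × Int) (xs : List (Int × Int)) :
    pvHeads? (gs.map (fun g => g x :: xs.map g))
      = some (gs.map (fun g => g x), gs.map (fun g => xs.map g)) := by
  induction gs with
  | nil => rfl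
  | cons g gs ih => simp [pvHeads?, ih]

theorem zipStarGo_map (gs : List ((Int × Int) → (Int × Int))) (xs : List (Int × Int)) :
    zipStarGo xs.length (gs.map (fun g => xs.map g)) = xs.map (fun x => gs.map (fun g => g x)) := by
  induction xs with
  | nil => simp [zipStarGo]
  | cons x xs ih =>
    rw [List.length_cons, zipStarGo]
    simp only [List.map_cons]
    rw [pvHeads?_map]
    dsimp only
    rw [ih]

-- zip(*layers) of per-function maps over one list is the transposed map.
theorem zipStar_map (g0 : (Int × Int) → (Int × Int)) (gs : List ((Int × Int) → (Int × Int)))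
    (xs : List (Int × Int)) :
    zipStar ((g0 :: gs).map (fun g => xs.map g)) = xs.map (fun x => (g0 :: gs).map (fun g => g x)) := by
  have h : zipStar ((g0 :: gs).map (fun g => xs.map g))
      = zipStarGo (xs.map g0).length ((g0 :: gs).map (fun g => xs.map g)) := rfl
  rw [h, List.length_map, zipStarGo_map]

-- ===== VERDICT (by name: the statement is the Claim_ definition above) =====
theorem index_generator_spec : Claim_equal_index_generator := by
  intro start_tiles direction height width _hDom _hPre
  unfold Spec_index_generator index_generator index_generator_alt
  rw [foldl_append_singleton (fun s =>
    igLoop ((OFFSETS.get? direction).getD (0, 0)) (height - 1) [s] s)]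
  simp only [List.nil_append]
  set off := (OFFSETS.get? direction).getD (0, 0) with hoff
  set n := (height - 1).toNat with hn
  -- B side: layers in closed form, written as maps of shift functions over start_tiles
  rw [igBuild_eq]
  have hlayers : ([start_tiles] ++ (List.range n).map (fun (i : Nat) =>
        start_tiles.map (fun p => (p.1 + ((i : Int) + 1) * off.1, p.2 + ((i : Int) + 1) * off.2))))
      = ((fun p : Int × Int => p) ::
          (List.range n).map (fun (i : Nat) => fun p : Int × Int =>
            (p.1 + ((i : Int) + 1) * off.1, p.2 + ((i : Int) + 1) * off.2))).map
          (fun g => start_tiles.map g) := by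
    simp [List.map_map, Function.comp]
  rw [hlayers, zipStar_map]
  -- A side: each line in closed form
  apply List.map_congr_left
  intro s _
  rw [igLoop_eq]
  have h1 : (height - 1 + 1 - (([s] : List (Int × Int)).length : Int)).toNat = n := by
    simp [hn]
  rw [h1]
  simp [List.map_map, Function.comp]
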